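-- pv_equiv track=rewrite | github.com/domel/rdf12conv | rdf_converter.py | split_iri_for_prefix
-- ===== SOURCE A (Python) =====
-- def split_iri_for_prefix(iri: str) -> tuple[str, str] | None:
--     """Split an IRI into a candidate namespace/local-name pair."""
--     if not iri:
--         return None
--     scheme_sep = iri.find(":")
--     if scheme_sep < 0:
--         return None
--
--     candidates: list[int] = []
--     for idx, ch in enumerate(iri):
--         if ch in "#/":
--             candidates.append(idx)
--         elif ch == ":" and idx > scheme_sep:
--             candidates.append(idx)
--
--     if not candidates:
--         return None
--
--     cut = max(candidates)
--     return iri[: cut + 1], iri[cut + 1 :]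
-- ===== SOURCE B (Python) =====
-- def split_iri_for_prefix(iri: str) -> tuple[str, str] | None:
--     """Split an IRI into a candidate namespace/local-name pair."""
--     if not iri:
--         return None
--     scheme_sep = iri.find(":")
--     if scheme_sep < 0:
--         return None
--     c = iri.rfind(":")
--     cut = max(iri.rfind("#"), iri.rfind("/"), c if c > scheme_sep else -1)
--     if cut < 0:
--         return None
--     return iri[: cut + 1], iri[cut + 1:]
-- ===== Notes on version B (the rewrite author's own statement) =====
-- stated objective: idiomatic
-- what changed: Replaced the explicit enumerate-and-collect loop over all characters (building a candidate index list, then taking its max) with three library reverse searches rfind of the hash, slash and colon separators, the colon one counted only when it falls strictly after the scheme colon, combined with max.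
import Mathlib
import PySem

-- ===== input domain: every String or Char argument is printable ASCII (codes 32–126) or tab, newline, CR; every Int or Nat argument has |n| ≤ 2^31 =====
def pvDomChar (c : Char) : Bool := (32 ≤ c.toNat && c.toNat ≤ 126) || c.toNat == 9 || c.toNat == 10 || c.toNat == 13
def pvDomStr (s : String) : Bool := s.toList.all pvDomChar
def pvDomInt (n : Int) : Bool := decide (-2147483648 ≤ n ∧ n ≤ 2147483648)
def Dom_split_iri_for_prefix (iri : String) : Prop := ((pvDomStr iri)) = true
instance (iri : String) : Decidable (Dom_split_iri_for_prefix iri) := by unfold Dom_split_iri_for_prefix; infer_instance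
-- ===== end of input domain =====

-- B replaces A's explicit enumerate-and-collect loop over the IRI with three library
-- reverse searches (rfind) combined by max — more idiomatic, same exact result.


-- ===== PORT A =====
def split_iri_for_prefix (iri : String) : Option (String × String) :=
  if iri.toList = [] then none
  else
    let scheme_sep := PySem.Str.find iri ":"
    if scheme_sep < 0 then none
    else
      let candidates : List Int := (PySem.List.enumerate iri.toList 0).foldl
        (fun acc p =>
          if PySem.Str.isIn (String.ofList [p.2]) "#/" then acc ++ [p.1]
          else if p.2 = ':' ∧ p.1 > scheme_sep then acc ++ [p.1]
          else acc) []
      match PySem.List.max? candidates (fun x => x) with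
      | none => none
      | some cut =>
          some (PySem.Str.slice iri none (some (cut + 1)),
                PySem.Str.slice iri (some (cut + 1)) none)

-- ===== PORT B =====
def split_iri_for_prefix_alt (iri : String) : Option (String × String) :=
  if iri.toList = [] then none
  else
    let scheme_sep := PySem.Str.find iri ":"
    if scheme_sep < 0 then none
    else
      let c := PySem.Str.rfind iri ":"
      let cut := max (max (PySem.Str.rfind iri "#") (PySem.Str.rfind iri "/"))
                     (if c > scheme_sep then c else -1)
      if cut < 0 then none
      else
        some (PySem.Str.slice iri none (some (cut + 1)),
              PySem.Str.slice iri (some (cut + 1)) none)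

-- ===== PRECONDITION & SPEC =====
def Spec_split_iri_for_prefix (iri : String) (out : Option (String × String)) : Prop := out = split_iri_for_prefix_alt iri
instance (iri : String) (out : Option (String × String)) : Decidable (Spec_split_iri_for_prefix iri out) := by unfold Spec_split_iri_for_prefix; infer_instance

-- ===== CLAIM (what is proved, stated in full; the proofs are below) =====
def Claim_equal_split_iri_for_prefix : Prop := ∀ (iri : String), Dom_split_iri_for_prefix iri → Spec_split_iri_for_prefix iri (split_iri_for_prefix iri)

-- ===== LEMMAS AND PROOFS =====

-- A's candidate list in filter/map form (proof helper)
def pvCands (ss : Int) (l : List Char) : List Int :=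
  ((PySem.List.enumerate l 0).filter
    (fun p => PySem.Str.isIn (String.ofList [p.2]) "#/" || (decide (p.2 = ':') && decide (p.1 > ss)))).map (·.1)

-- B's cut value (proof helper)
def pvCut (ss : Int) (l : List Char) : Int :=
  max (max (PySem.Chars.rfind l ['#']) (PySem.Chars.rfind l ['/']))
      (if PySem.Chars.rfind l [':'] > ss then PySem.Chars.rfind l [':'] else -1)

-- the candidate condition of A's loop body, on an index of l
def pvCand (ss : Int) (l : List Char) (j : Nat) : Prop :=
  l[j]? = some '#' ∨ l[j]? = some '/' ∨ (l[j]? = some ':' ∧ (j : Int) > ss)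

-- [a] is a prefix of xs iff xs starts with a
theorem pv_singleton_isPrefixOf (a : Char) (xs : List Char) :
    [a].isPrefixOf xs = true ↔ xs.head? = some a := by
  cases xs with
  | nil => simp [List.isPrefixOf]
  | cons x t =>
      simp only [List.isPrefixOf, Bool.and_eq_true, beq_iff_eq, List.isPrefixOf_nil_left,
        and_true, List.head?_cons, Option.some.injEq]
      exact eq_comm

-- rfind.go for a single-char needle returns -1 iff the char occurs at no index ≤ k
theorem pv_go_neg_iff (l : List Char) (a : Char) (k : Nat) :
    PySem.Chars.rfind.go l [a] k = -1 ↔ ∀ j : Nat, j ≤ k → l[j]? ≠ some a := by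
  induction k with
  | zero =>
      rw [PySem.Chars.rfind.go]
      by_cases hp : [a].isPrefixOf (List.drop 0 l) = true
      · rw [if_pos (by simpa using hp)]
        rw [pv_singleton_isPrefixOf, List.head?_drop] at hp
        constructor
        · intro h; exact absurd h (by norm_num)
        · intro h; exact absurd hp (h 0 (le_refl 0))
      · rw [if_neg (by simpa using hp)]
        rw [pv_singleton_isPrefixOf, List.head?_drop] at hp
        constructor
        · intro _ j hj
          obtain rfl := Nat.le_zero.mp hj
          exact hp
        · intro _; rfl
  | succ k ih =>
      rw [PySem.Chars.rfind.go]
      by_cases hp : [a].isPrefixOf (List.drop (k+1) l) = true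
      · rw [if_pos hp]
        rw [pv_singleton_isPrefixOf, List.head?_drop] at hp
        constructor
        · intro h; exact absurd h (by omega)
        · intro h; exact absurd hp (h (k+1) (le_refl _))
      · rw [if_neg hp]
        rw [pv_singleton_isPrefixOf, List.head?_drop] at hp
        rw [ih]
        constructor
        · intro h j hj
          by_cases hj' : j ≤ k
          · exact h j hj'
          · have : j = k+1 := by omega
            subst this; exact hp
        · intro h j hj; exact h j (by omega)

-- rfind.go ≠ -1 returns the greatest index ≤ k holding the char
theorem pv_go_found (l : List Char) (a : Char) (k : Nat)
    (h : PySem.Chars.rfind.go l [a] k ≠ -1) :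
    ∃ j : Nat, PySem.Chars.rfind.go l [a] k = (j : Int) ∧ j ≤ k ∧ l[j]? = some a ∧
      ∀ i : Nat, j < i → i ≤ k → l[i]? ≠ some a := by
  induction k with
  | zero =>
      rw [PySem.Chars.rfind.go] at h ⊢
      by_cases hp : [a].isPrefixOf (List.drop 0 l) = true
      · rw [if_pos (by simpa using hp)]
        rw [pv_singleton_isPrefixOf, List.head?_drop] at hp
        exact ⟨0, by simp, le_refl _, hp, by omega⟩
      · rw [if_neg (by simpa using hp)] at h
        exact absurd rfl h
  | succ k ih =>
      rw [PySem.Chars.rfind.go] at h ⊢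
      by_cases hp : [a].isPrefixOf (List.drop (k+1) l) = true
      · rw [if_pos hp]
        rw [pv_singleton_isPrefixOf, List.head?_drop] at hp
        exact ⟨k+1, by simp, le_refl _, hp, by omega⟩
      · rw [if_neg hp] at h ⊢
        rw [pv_singleton_isPrefixOf, List.head?_drop] at hp
        obtain ⟨j, hj1, hj2, hj3, hj4⟩ := ih h
        refine ⟨j, hj1, by omega, hj3, ?_⟩
        intro i hji hik
        by_cases hik' : i ≤ k
        · exact hj4 i hji hik'
        · have : i = k+1 := by omega
          subst this; exact hp

-- rfind spec (single char): -1 iff absent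
theorem pv_rfind_neg_iff (l : List Char) (a : Char) :
    PySem.Chars.rfind l [a] = -1 ↔ ∀ j : Nat, l[j]? ≠ some a := by
  rw [PySem.Chars.rfind, pv_go_neg_iff]
  constructor
  · intro h j
    rcases Nat.lt_or_ge j l.length with hl | hg
    · exact h j (by omega)
    · simp [List.getElem?_eq_none hg]
  · intro h j _; exact h j

-- rfind spec (single char): otherwise the greatest index holding the char
theorem pv_rfind_found (l : List Char) (a : Char)
    (h : PySem.Chars.rfind l [a] ≠ -1) :
    ∃ j : Nat, PySem.Chars.rfind l [a] = (j : Int) ∧ l[j]? = some a ∧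
      ∀ i : Nat, j < i → l[i]? ≠ some a := by
  rw [PySem.Chars.rfind] at h ⊢
  obtain ⟨j, h1, _, h3, h4⟩ := pv_go_found l a l.length h
  refine ⟨j, h1, h3, ?_⟩
  intro i hji
  rcases Nat.lt_or_ge i l.length with hl | hg
  · exact h4 i hji (by omega)
  · simp [List.getElem?_eq_none hg]

-- the char-in-"#/" test of Port A, characterised
theorem pv_isIn_sharp_slash (c : Char) :
    PySem.Str.isIn (String.ofList [c]) "#/" = true ↔ c = '#' ∨ c = '/' := by
  rw [PySem.Str.isIn_eq, String.toList_ofList]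
  rw [show ("#/".toList) = ['#', '/'] from rfl]
  rw [PySem.Chars.isIn_iff_infix]
  constructor
  · rintro ⟨s, t, h⟩
    have : c ∈ ['#', '/'] := by rw [← h]; simp
    simpa using this
  · rintro (rfl | rfl)
    · exact ⟨[], ['/'], rfl⟩
    · exact ⟨['#'], [], rfl⟩

-- A's fold equals pvCands
theorem pv_candidates_eq (l : List Char) (ss : Int) :
    (PySem.List.enumerate l 0).foldl
        (fun acc p =>
          if PySem.Str.isIn (String.ofList [p.2]) "#/" then acc ++ [p.1]
          else if p.2 = ':' ∧ p.1 > ss then acc ++ [p.1]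
          else acc) [] = pvCands ss l := by
  have hfun : (fun (acc : List Int) (p : Int × Char) =>
          if PySem.Str.isIn (String.ofList [p.2]) "#/" then acc ++ [p.1]
          else if p.2 = ':' ∧ p.1 > ss then acc ++ [p.1]
          else acc) =
      (fun acc p =>
        if (PySem.Str.isIn (String.ofList [p.2]) "#/" || (decide (p.2 = ':') && decide (p.1 > ss))) = true
        then acc ++ [(·.1) p] else acc) := by
    funext acc p
    by_cases h1 : PySem.Str.isIn (String.ofList [p.2]) "#/" = true <;>
      by_cases h2 : p.2 = ':' ∧ p.1 > ss <;>
      simp [h1, h2]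
  rw [hfun, PySem.List.foldl_append_if]
  simp [pvCands]

-- membership in A's candidate list ↔ pvCand
theorem pv_mem_candidates (l : List Char) (ss : Int) (x : Int) :
    x ∈ pvCands ss l ↔ ∃ j : Nat, x = (j : Int) ∧ pvCand ss l j := by
  unfold pvCands
  simp only [List.mem_map, List.mem_filter]
  constructor
  · rintro ⟨p, ⟨hmem, hcond⟩, rfl⟩
    rw [PySem.List.mem_enumerate_iff] at hmem
    obtain ⟨k, hk, rfl⟩ := hmem
    refine ⟨k, by simp, ?_⟩
    unfold pvCand
    simp only [Bool.or_eq_true, Bool.and_eq_true, decide_eq_true_eq] at hcond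
    rcases hcond with h | ⟨h1, h2⟩
    · rw [pv_isIn_sharp_slash] at h
      rcases h with h | h <;> simp [List.getElem?_eq_getElem hk, h]
    · right; right
      refine ⟨by simp [List.getElem?_eq_getElem hk, h1], by simpa using h2⟩
  · rintro ⟨j, rfl, hc⟩
    unfold pvCand at hc
    have hj : j < l.length := by
      rcases hc with h | h | ⟨h, _⟩ <;>
        · by_contra hge
          rw [List.getElem?_eq_none (by omega)] at h
          simp at h
    refine ⟨((j : Int), l[j]), ⟨?_, ?_⟩, by simp⟩
    · rw [PySem.List.mem_enumerate_iff]
      exact ⟨j, hj, by simp⟩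
    · simp only [Bool.or_eq_true, Bool.and_eq_true, decide_eq_true_eq]
      rw [List.getElem?_eq_getElem hj] at hc
      rcases hc with h | h | ⟨h1, h2⟩
      · left; rw [pv_isIn_sharp_slash]; left; simpa using h
      · left; rw [pv_isIn_sharp_slash]; right; simpa using h
      · right; exact ⟨by simpa using h1, by simpa using h2⟩

-- the max of A's candidate list is B's cut (none iff cut = -1)
theorem pv_cut_eq (l : List Char) (ss : Int) (hss : 0 ≤ ss) :
    PySem.List.max? (pvCands ss l) (fun x => x) =
      if pvCut ss l < 0 then none else some (pvCut ss l) := by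
  rcases hmax : PySem.List.max? (pvCands ss l) (fun x => x) with _ | m
  · have hempty : pvCands ss l = [] := (PySem.List.max?_eq_none_iff _ _).mp hmax
    have hno : ∀ j : Nat, ¬ pvCand ss l j := by
      intro j hj
      have : ((j : Int)) ∈ pvCands ss l := (pv_mem_candidates l ss _).mpr ⟨j, rfl, hj⟩
      rw [hempty] at this; simp at this
    have h1 : PySem.Chars.rfind l ['#'] = -1 := by
      rw [pv_rfind_neg_iff]; intro j hj; exact hno j (Or.inl hj)
    have h2 : PySem.Chars.rfind l ['/'] = -1 := by
      rw [pv_rfind_neg_iff]; intro j hj; exact hno j (Or.inr (Or.inl hj))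
    have h3 : ¬ (PySem.Chars.rfind l [':'] > ss) := by
      intro hgt
      have hne : PySem.Chars.rfind l [':'] ≠ -1 := by omega
      obtain ⟨j, hj1, hj2, _⟩ := pv_rfind_found l ':' hne
      exact hno j (Or.inr (Or.inr ⟨hj2, by rw [← hj1]; exact hgt⟩))
    have hcut : pvCut ss l = -1 := by
      unfold pvCut; rw [h1, h2, if_neg h3]; simp
    rw [hcut]; norm_num
  · have hmem := PySem.List.max?_mem hmax
    have hub : ∀ y ∈ pvCands ss l, y ≤ m := fun y hy => PySem.List.max?_isMax hmax y hy
    obtain ⟨j, rfl, hcand⟩ := (pv_mem_candidates l ss m).mp hmem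
    have hcut : pvCut ss l = (j : Int) := by
      unfold pvCut
      apply le_antisymm
      · have c1 : PySem.Chars.rfind l ['#'] ≤ (j : Int) := by
          rcases eq_or_ne (PySem.Chars.rfind l ['#']) (-1) with h | h
          · omega
          · obtain ⟨j', hj1, hj2, _⟩ := pv_rfind_found l '#' h
            rw [hj1]
            exact hub _ ((pv_mem_candidates l ss _).mpr ⟨j', rfl, Or.inl hj2⟩)
        have c2 : PySem.Chars.rfind l ['/'] ≤ (j : Int) := by
          rcases eq_or_ne (PySem.Chars.rfind l ['/']) (-1) with h | h
          · omega
          · obtain ⟨j', hj1, hj2, _⟩ := pv_rfind_found l '/' h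
            rw [hj1]
            exact hub _ ((pv_mem_candidates l ss _).mpr ⟨j', rfl, Or.inr (Or.inl hj2)⟩)
        have c3 : (if PySem.Chars.rfind l [':'] > ss then PySem.Chars.rfind l [':'] else -1) ≤ (j : Int) := by
          by_cases hgt : PySem.Chars.rfind l [':'] > ss
          · rw [if_pos hgt]
            have hne : PySem.Chars.rfind l [':'] ≠ -1 := by omega
            obtain ⟨j', hj1, hj2, _⟩ := pv_rfind_found l ':' hne
            rw [hj1]
            exact hub _ ((pv_mem_candidates l ss _).mpr
              ⟨j', rfl, Or.inr (Or.inr ⟨hj2, by rw [← hj1]; exact hgt⟩)⟩)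
          · rw [if_neg hgt]; omega
        exact max_le (max_le c1 c2) c3
      · rcases hcand with h | h | ⟨h, hgt⟩
        · have hne : PySem.Chars.rfind l ['#'] ≠ -1 := by
            rw [Ne, pv_rfind_neg_iff]; push_neg; exact ⟨j, h⟩
          obtain ⟨j', hj1, _, hj3⟩ := pv_rfind_found l '#' hne
          have hle : j ≤ j' := by
            by_contra hlt; push_neg at hlt; exact hj3 j hlt h
          calc ((j : Int)) ≤ (j' : Int) := by exact_mod_cast hle
            _ = PySem.Chars.rfind l ['#'] := hj1.symm
            _ ≤ _ := le_trans (le_max_left _ _) (le_max_left _ _)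
        · have hne : PySem.Chars.rfind l ['/'] ≠ -1 := by
            rw [Ne, pv_rfind_neg_iff]; push_neg; exact ⟨j, h⟩
          obtain ⟨j', hj1, _, hj3⟩ := pv_rfind_found l '/' hne
          have hle : j ≤ j' := by
            by_contra hlt; push_neg at hlt; exact hj3 j hlt h
          calc ((j : Int)) ≤ (j' : Int) := by exact_mod_cast hle
            _ = PySem.Chars.rfind l ['/'] := hj1.symm
            _ ≤ _ := le_trans (le_max_right _ _) (le_max_left _ _)
        · have hne : PySem.Chars.rfind l [':'] ≠ -1 := by
            rw [Ne, pv_rfind_neg_iff]; push_neg; exact ⟨j, h⟩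
          obtain ⟨j', hj1, _, hj3⟩ := pv_rfind_found l ':' hne
          have hle : j ≤ j' := by
            by_contra hlt; push_neg at hlt; exact hj3 j hlt h
          have hgt' : PySem.Chars.rfind l [':'] > ss := by
            rw [hj1]; exact lt_of_lt_of_le hgt (by exact_mod_cast hle)
          calc ((j : Int)) ≤ PySem.Chars.rfind l [':'] := by rw [hj1]; exact_mod_cast hle
            _ = (if PySem.Chars.rfind l [':'] > ss then PySem.Chars.rfind l [':'] else -1) := by
                rw [if_pos hgt']
            _ ≤ _ := le_max_right _ _
    rw [hcut, if_neg (by omega)]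

-- the two ports agree
theorem pv_main (iri : String) : split_iri_for_prefix iri = split_iri_for_prefix_alt iri := by
  unfold split_iri_for_prefix split_iri_for_prefix_alt
  by_cases hnil : iri.toList = []
  · simp [hnil]
  · simp only [if_neg hnil, PySem.Str.rfind_eq, PySem.Str.find_eq,
      show (":".toList) = [':'] from rfl, show ("#".toList) = ['#'] from rfl,
      show ("/".toList) = ['/'] from rfl]
    by_cases hneg : PySem.Chars.find iri.toList [':'] < 0
    · simp only [if_pos hneg]
    · simp only [if_neg hneg]
      rw [pv_candidates_eq, pv_cut_eq _ _ (by omega)]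
      simp only [pvCut]
      split_ifs with h <;> rfl

-- ===== VERDICT (by name: the statement is the Claim_ definition above) =====
theorem split_iri_for_prefix_spec : Claim_equal_split_iri_for_prefix := by
  intro iri _
  unfold Spec_split_iri_for_prefix
  exact pv_main iri
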